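-- pv_equiv track=rewrite | github.com/Nageswararao92/meeting_summarizer | backend/utils/summarizer.py | _prefer_model_order
-- ===== SOURCE A (Python) =====
-- def _prefer_model_order(names):
--     """Sort models by preference: flash-lite, flash, pro(non-preview), preview/exp, others."""
--     def rank(n: str):
--         s = (n or "").lower()
--         if "flash-lite" in s:
--             return (0, len(s))
--         if "flash" in s:
--             return (1, len(s))
--         if "-pro" in s and "preview" not in s and "-exp" not in s:
--             return (2, len(s))
--         if "preview" in s or "-exp" in s:
--             return (3, len(s))
--         return (4, len(s))
--
--     seen = set()
--     uniq = []
--     for n in names: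
--         if n and n not in seen:
--             uniq.append(n)
--             seen.add(n)
--     return sorted(uniq, key=rank)
-- ===== SOURCE B (Python) =====
-- def _prefer_model_order(names):
--     """Same result as A: bucket the deduped names by preference category, then
--     stably sort each bucket by length alone and concatenate the buckets."""
--     def category(n):
--         s = n.lower()
--         if "flash-lite" in s:
--             return 0
--         if "flash" in s:
--             return 1
--         if "-pro" in s and "preview" not in s and "-exp" not in s:
--             return 2
--         if "preview" in s or "-exp" in s:
--             return 3
--         return 4
--
--     uniq = list(dict.fromkeys(n for n in names if n))
--     return [n for c in range(5)
--               for n in sorted([m for m in uniq if category(m) == c], key=len)]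
-- ===== Notes on version B (the rewrite author's own statement) =====
-- stated objective: alternative
-- what changed: Replaces the single stable sort under a composite (category, length) key by an explicit partition of the deduped names into the five preference buckets, each bucket stably sorted by length alone and the buckets concatenated in category order; the dedup is done with dict.fromkeys over the truthy names instead of a seen-set loop.
import Mathlib
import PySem

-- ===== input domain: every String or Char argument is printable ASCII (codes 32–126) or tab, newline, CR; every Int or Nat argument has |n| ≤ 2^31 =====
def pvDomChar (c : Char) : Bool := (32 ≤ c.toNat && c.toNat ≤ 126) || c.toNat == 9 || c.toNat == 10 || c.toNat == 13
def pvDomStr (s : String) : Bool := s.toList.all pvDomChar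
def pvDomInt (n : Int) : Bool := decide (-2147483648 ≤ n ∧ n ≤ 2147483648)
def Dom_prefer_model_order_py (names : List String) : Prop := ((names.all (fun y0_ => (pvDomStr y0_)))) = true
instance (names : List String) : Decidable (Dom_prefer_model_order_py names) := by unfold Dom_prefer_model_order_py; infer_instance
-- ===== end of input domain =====

-- B replaces A's single stable sort under the composite (category, length) key by a
-- five-way bucket partition of the deduped names, each bucket stably sorted by length
-- alone and concatenated in category order (objective: alternative decomposition).


-- ===== PORT A =====
-- rank(n) = (pvRankCat n, pvRankLen n): the two components of A's sort key
def pvRankCat (n : String) : Nat :=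
  let s := PySem.Str.lower (if n == "" then "" else n)
  if PySem.Str.isIn "flash-lite" s then 0
  else if PySem.Str.isIn "flash" s then 1
  else if PySem.Str.isIn "-pro" s && !(PySem.Str.isIn "preview" s) && !(PySem.Str.isIn "-exp" s) then 2
  else if PySem.Str.isIn "preview" s || PySem.Str.isIn "-exp" s then 3
  else 4

def pvRankLen (n : String) : Int :=
  let s := PySem.Str.lower (if n == "" then "" else n)
  PySem.Str.len s

-- the 'seen'/'uniq' dedup loop of A
def pvUniqLoop : List String → PySem.Set String → List String → List String
  | [], _, uniq => uniq
  | n :: rest, seen, uniq =>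
    if !(n == "") && !(PySem.Set.contains seen n) then
      pvUniqLoop rest (PySem.Set.add seen n) (uniq ++ [n])
    else
      pvUniqLoop rest seen uniq

def prefer_model_order_py (names : List String) : List String :=
  PySem.List.sorted2 (pvUniqLoop names PySem.Set.empty []) pvRankCat pvRankLen false

-- ===== PORT B =====
def pvCategory (n : String) : Nat :=
  let s := PySem.Str.lower n
  if PySem.Str.isIn "flash-lite" s then 0
  else if PySem.Str.isIn "flash" s then 1
  else if PySem.Str.isIn "-pro" s && !(PySem.Str.isIn "preview" s) && !(PySem.Str.isIn "-exp" s) then 2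
  else if PySem.Str.isIn "preview" s || PySem.Str.isIn "-exp" s then 3
  else 4

def prefer_model_order_py_alt (names : List String) : List String :=
  let uniq := PySem.List.dedup (names.filter (fun n => !(n == "")))
  (List.range 5).flatMap (fun c =>
    PySem.List.sorted (uniq.filter (fun m => pvCategory m == c)) (fun n => PySem.Str.len n) false)

-- ===== PRECONDITION & SPEC =====
def Spec_prefer_model_order_py (names : List String) (out : List String) : Prop := out = prefer_model_order_py_alt names
instance (names : List String) (out : List String) : Decidable (Spec_prefer_model_order_py names out) := by unfold Spec_prefer_model_order_py; infer_instance

-- ===== CLAIM (what is proved, stated in full; the proofs are below) =====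
def Claim_equal_prefer_model_order_py : Prop := ∀ (names : List String), Dom_prefer_model_order_py names → Spec_prefer_model_order_py names (prefer_model_order_py names)

-- ===== LEMMAS AND PROOFS =====

-- A's rank category equals B's (the 'n or ""' guard is the identity on strings)
theorem pvRankCat_eq_pvCategory (n : String) : pvRankCat n = pvCategory n := by
  by_cases h : n = "" <;> simp [pvRankCat, pvCategory, h]

-- A's rank length (length of the lowered string) equals the plain length
theorem pvRankLen_eq_len (n : String) : pvRankLen n = PySem.Str.len n := by
  by_cases h : n = "" <;>
    simp [pvRankLen, h, PySem.Str.len_eq, PySem.Str.toList_lower, PySem.Chars.lower]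

-- A's seen/uniq loop is the ordered dedup of the nonempty names
theorem pvUniqLoop_eq (names : List String) (u : List String) :
    pvUniqLoop names u u = (names.filter (fun n => !(n == ""))).foldl PySem.Set.add u := by
  induction names generalizing u with
  | nil => simp [pvUniqLoop]
  | cons n rest ih =>
    by_cases hn : n = ""
    · simp [pvUniqLoop, hn, ih]
    · by_cases hc : n ∈ u
      · have hct : PySem.Set.contains u n = true := (PySem.Set.contains_iff u n).2 hc
        simp only [pvUniqLoop]
        rw [if_neg (by simp [hc]), List.filter_cons_of_pos (by simp [hn]), List.foldl_cons,
          PySem.Set.add_of_mem hc, ih]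
      · have hct : PySem.Set.contains u n = false := by
          cases h : PySem.Set.contains u n
          · rfl
          · exact absurd ((PySem.Set.contains_iff u n).1 h) hc
        simp only [pvUniqLoop]
        rw [if_pos (by simp [hn, hc]), List.filter_cons_of_pos (by simp [hn]), List.foldl_cons,
          PySem.Set.add_of_not_mem hc, ih]

-- insertBy passes over a prefix it does not go before
theorem insertBy_append_not {α : Type} (bf : α → α → Bool) (x : α) (l1 l2 : List α)
    (h : ∀ y ∈ l1, bf x y = false) :
    PySem.List.insertBy bf x (l1 ++ l2) = l1 ++ PySem.List.insertBy bf x l2 := by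
  induction l1 with
  | nil => simp
  | cons z l ih =>
    have hz := h z (by simp)
    simp [PySem.List.insertBy, hz, ih (fun y hy => h y (by simp [hy]))]

-- insertBy never enters a suffix it goes before entirely
theorem insertBy_append_all {α : Type} (bf : α → α → Bool) (x : α) (l1 l2 : List α)
    (h : ∀ y ∈ l2, bf x y = true) :
    PySem.List.insertBy bf x (l1 ++ l2) = PySem.List.insertBy bf x l1 ++ l2 := by
  induction l1 with
  | nil =>
    cases l2 with
    | nil => simp [PySem.List.insertBy]
    | cons z t => simp [PySem.List.insertBy, h z (by simp)]
  | cons z l ih =>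
    by_cases hz : bf x z = true
    · simp [PySem.List.insertBy, hz]
    · simp [PySem.List.insertBy, hz, ih]

theorem insertBy_congr {α : Type} (bf bf' : α → α → Bool) (x : α) (l : List α)
    (h : ∀ y ∈ l, bf x y = bf' x y) :
    PySem.List.insertBy bf x l = PySem.List.insertBy bf' x l := by
  induction l with
  | nil => rfl
  | cons z t ih =>
    have hz := h z (by simp)
    by_cases hb : bf x z = true
    · simp [PySem.List.insertBy, hb, hz ▸ hb]
    · simp [PySem.List.insertBy, hb, hz ▸ hb, ih (fun y hy => h y (by simp [hy]))]

theorem pvCategory_le (n : String) : pvCategory n ≤ 4 := by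
  unfold pvCategory; dsimp only; split_ifs <;> omega

-- one bucket of B: the names of category c, stably sorted by length
def pvS (c : Nat) (L : List String) : List String :=
  PySem.List.sorted (L.filter (fun m => pvCategory m == c)) (fun n => PySem.Str.len n) false

-- A's lexicographic comparator and B's per-bucket length comparator
def pvLex (a b : String) : Bool :=
  decide (pvRankCat a < pvRankCat b) ||
    (!decide (pvRankCat b < pvRankCat a) && decide (pvRankLen a < pvRankLen b))

def pvLenB (a b : String) : Bool := decide (PySem.Str.len a < PySem.Str.len b)

theorem mem_pvS {c : Nat} {L : List String} {y : String} (hy : y ∈ pvS c L) :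
    pvCategory y = c := by
  have := (PySem.List.mem_sorted _ _ _ _).1 hy
  simpa using (List.mem_filter.1 this).2

theorem pvLex_false {x y : String} (h : pvCategory y < pvCategory x) : pvLex x y = false := by
  simp only [pvLex, pvRankCat_eq_pvCategory]
  simp [Nat.not_lt.2 (Nat.le_of_lt h), h]

theorem pvLex_true {x y : String} (h : pvCategory x < pvCategory y) : pvLex x y = true := by
  simp [pvLex, pvRankCat_eq_pvCategory, h]

theorem pvLex_eq {x y : String} (h : pvCategory x = pvCategory y) : pvLex x y = pvLenB x y := by
  simp [pvLex, pvLenB, pvRankCat_eq_pvCategory, pvRankLen_eq_len, h]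

theorem sorted2_append (L : List String) (x : String) :
    PySem.List.sorted2 (L ++ [x]) pvRankCat pvRankLen false =
      PySem.List.insertBy pvLex x (PySem.List.sorted2 L pvRankCat pvRankLen false) := by
  simp only [PySem.List.sorted2, List.foldl_append, List.foldl_cons, List.foldl_nil]
  rfl

theorem pvS_append (c : Nat) (L : List String) (x : String) :
    pvS c (L ++ [x]) =
      if pvCategory x = c then PySem.List.insertBy pvLenB x (pvS c L) else pvS c L := by
  by_cases h : pvCategory x = c
  · simp only [pvS, List.filter_append, h, PySem.List.sorted_eq_foldl_insertBy, List.foldl_append,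
      beq_self_eq_true, List.filter_cons, List.filter_nil]
    rfl
  · simp [pvS, List.filter_append, h]

theorem insert_mid (x : String) (A M B : List String)
    (hA : ∀ y ∈ A, pvCategory y < pvCategory x)
    (hM : ∀ y ∈ M, pvCategory y = pvCategory x)
    (hB : ∀ y ∈ B, pvCategory x < pvCategory y) :
    PySem.List.insertBy pvLex x (A ++ (M ++ B)) = A ++ (PySem.List.insertBy pvLenB x M ++ B) := by
  rw [insertBy_append_not _ _ _ _ (fun y hy => pvLex_false (hA y hy)),
      insertBy_append_all _ _ _ _ (fun y hy => pvLex_true (hB y hy)),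
      insertBy_congr _ _ _ _ (fun y hy => pvLex_eq (hM y hy).symm)]

theorem main5 (L : List String) :
    PySem.List.sorted2 L pvRankCat pvRankLen false =
      pvS 0 L ++ (pvS 1 L ++ (pvS 2 L ++ (pvS 3 L ++ pvS 4 L))) := by
  induction L using List.reverseRecOn with
  | nil => simp [PySem.List.sorted2, pvS, PySem.List.sorted]
  | append_singleton L x ih =>
    rw [sorted2_append, ih]
    have hle := pvCategory_le x
    obtain h | h | h | h | h :
        pvCategory x = 0 ∨ pvCategory x = 1 ∨ pvCategory x = 2 ∨ pvCategory x = 3 ∨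
          pvCategory x = 4 := by omega
    · have := insert_mid x [] (pvS 0 L) (pvS 1 L ++ (pvS 2 L ++ (pvS 3 L ++ pvS 4 L)))
        (by simp)
        (fun y hy => by have := mem_pvS hy; omega)
        (fun y hy => by
          simp only [List.mem_append] at hy
          rcases hy with hy | hy | hy | hy <;> (have := mem_pvS hy; omega))
      simpa [pvS_append, h] using this
    · have := insert_mid x (pvS 0 L) (pvS 1 L) (pvS 2 L ++ (pvS 3 L ++ pvS 4 L))
        (fun y hy => by have := mem_pvS hy; omega)
        (fun y hy => by have := mem_pvS hy; omega)
        (fun y hy => by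
          simp only [List.mem_append] at hy
          rcases hy with hy | hy | hy <;> (have := mem_pvS hy; omega))
      simpa [pvS_append, h, List.append_assoc] using this
    · have := insert_mid x (pvS 0 L ++ pvS 1 L) (pvS 2 L) (pvS 3 L ++ pvS 4 L)
        (fun y hy => by
          simp only [List.mem_append] at hy
          rcases hy with hy | hy <;> (have := mem_pvS hy; omega))
        (fun y hy => by have := mem_pvS hy; omega)
        (fun y hy => by
          simp only [List.mem_append] at hy
          rcases hy with hy | hy <;> (have := mem_pvS hy; omega))
      simpa [pvS_append, h, List.append_assoc] using this
    · have := insert_mid x (pvS 0 L ++ (pvS 1 L ++ pvS 2 L)) (pvS 3 L) (pvS 4 L)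
        (fun y hy => by
          simp only [List.mem_append] at hy
          rcases hy with hy | hy | hy <;> (have := mem_pvS hy; omega))
        (fun y hy => by have := mem_pvS hy; omega)
        (fun y hy => by have := mem_pvS hy; omega)
      simpa [pvS_append, h, List.append_assoc] using this
    · have := insert_mid x (pvS 0 L ++ (pvS 1 L ++ (pvS 2 L ++ pvS 3 L))) (pvS 4 L) []
        (fun y hy => by
          simp only [List.mem_append] at hy
          rcases hy with hy | hy | hy | hy <;> (have := mem_pvS hy; omega))
        (fun y hy => by have := mem_pvS hy; omega)
        (by simp)
      simpa [pvS_append, h, List.append_assoc] using this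

-- ===== VERDICT (by name: the statement is the Claim_ definition above) =====
theorem prefer_model_order_py_spec : Claim_equal_prefer_model_order_py := by
  intro names _
  unfold Spec_prefer_model_order_py prefer_model_order_py prefer_model_order_py_alt
  have h1 : pvUniqLoop names PySem.Set.empty [] =
      PySem.List.dedup (names.filter (fun n => !(n == ""))) := by
    rw [PySem.List.dedup_eq_ofList, PySem.Set.ofList_eq_foldl]
    exact pvUniqLoop_eq names []
  rw [h1, main5]
  simp [show List.range 5 = [0, 1, 2, 3, 4] from rfl, pvS]
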